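-- pv_equiv track=rewrite | github.com/cresqnt-sys/FishScope-Macro | main.py | generate_ao_variants
-- ===== SOURCE A (Python) =====
-- from itertools import product
--
-- def generate_ao_variants(name):
--     ambiguous_positions = [i for i, c in enumerate(name.lower()) if c in ('a', 'o')]
--     variants = []
--     options = [('a', 'o')] * len(ambiguous_positions)
--     for combo in product(*options):
--         name_list = list(name.lower())
--         for pos, char in zip(ambiguous_positions, combo):
--             name_list[pos] = char
--         variant = ''.join(name_list)
--         variants.append(variant.title())
--     return variants
-- ===== SOURCE B (Python) =====
-- def generate_ao_variants(name):
--     def go(chars, prefix):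
--         if not chars:
--             return [prefix.title()]
--         c, rest = chars[0], chars[1:]
--         if c in ('a', 'o'):
--             return go(rest, prefix + 'a') + go(rest, prefix + 'o')
--         return go(rest, prefix + c)
--     return go(name.lower(), '')
-- ===== Notes on version B (the rewrite author's own statement) =====
-- stated objective: alternative
-- what changed: Replaces the itertools.product enumeration with per-combo position patching by a single character-by-character recursion over the lowercased name that branches on each ambiguous character while carrying the accumulated prefix, titling only the completed string.
import Mathlib
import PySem

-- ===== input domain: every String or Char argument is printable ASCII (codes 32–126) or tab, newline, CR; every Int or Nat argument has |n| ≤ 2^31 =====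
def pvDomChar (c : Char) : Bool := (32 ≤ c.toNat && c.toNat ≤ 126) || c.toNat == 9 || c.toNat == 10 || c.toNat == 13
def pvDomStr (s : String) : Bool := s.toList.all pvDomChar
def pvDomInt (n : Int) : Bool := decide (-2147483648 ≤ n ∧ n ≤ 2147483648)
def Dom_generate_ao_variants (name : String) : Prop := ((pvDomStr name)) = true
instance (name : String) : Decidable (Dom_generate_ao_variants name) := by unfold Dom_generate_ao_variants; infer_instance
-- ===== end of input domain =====

-- B replaces the itertools.product enumeration + per-combo position patching with a single
-- character-by-character recursion branching at each ambiguous char (alternative decomposition).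

-- shared helper: `c in ('a', 'o')`
def aoB (c : Char) : Bool := c = 'a' || c = 'o'

-- shared helper: str.title(), exact on ASCII (a char is uppercased iff the previous char is not a letter)
def titleAux : List Char → Bool → List Char
  | [], _ => []
  | c :: t, prevAlpha =>
    (if PySem.Chars.isalpha c then
       (if prevAlpha then PySem.Chars.lowerChar c else PySem.Chars.upperChar c)
     else c) :: titleAux t (PySem.Chars.isalpha c)

def pyTitle (s : String) : String := String.mk (titleAux s.toList false)

-- ===== PORT A =====
-- itertools.product(*pools): leftmost pool varies slowest
def pyProduct : List (List Char) → List (List Char)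
  | [] => [[]]
  | p :: ps => p.flatMap (fun x => (pyProduct ps).map (x :: ·))

def generate_ao_variants (name : String) : List String :=
  let low := (PySem.Str.lower name).toList
  let ambiguous_positions := ((PySem.List.enumerate low 0).filter (fun p => aoB p.2)).map (·.1)
  let options := List.replicate ambiguous_positions.length (['a', 'o'] : List Char)
  (pyProduct options).foldl
    (fun variants combo =>
      let name_list := (ambiguous_positions.zip combo).foldl
        (fun nl pc => PySem.List.pySetD nl pc.1 pc.2) low
      variants ++ [pyTitle (String.mk name_list)]) []

-- ===== PORT B =====
def altGo : List Char → List Char → List String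
  | [], pre => [pyTitle (String.mk pre)]
  | c :: rest, pre =>
    if aoB c then altGo rest (pre ++ ['a']) ++ altGo rest (pre ++ ['o'])
    else altGo rest (pre ++ [c])

def generate_ao_variants_alt (name : String) : List String :=
  altGo (PySem.Str.lower name).toList []

-- ===== PRECONDITION & SPEC =====
def Spec_generate_ao_variants (name : String) (out : List String) : Prop := out = generate_ao_variants_alt name
instance (name : String) (out : List String) : Decidable (Spec_generate_ao_variants name out) := by unfold Spec_generate_ao_variants; infer_instance

-- ===== CLAIM (what is proved, stated in full; the proofs are below) =====
def Claim_equal_generate_ao_variants : Prop := ∀ (name : String), Dom_generate_ao_variants name → Spec_generate_ao_variants name (generate_ao_variants name)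

-- ===== LEMMAS AND PROOFS =====

-- the Nat positions of a/o chars
def aoPosN : List Char → List Nat
  | [] => []
  | c :: t => if aoB c then 0 :: (aoPosN t).map (· + 1) else (aoPosN t).map (· + 1)

-- replace the a/o chars of l by the chars of combo, in order
def fill : List Char → List Char → List Char
  | [], _ => []
  | c :: t, combo =>
    if aoB c then
      match combo with
      | [] => c :: fill t []
      | x :: xs => x :: fill t xs
    else c :: fill t combo

def P (n : Nat) : List (List Char) := pyProduct (List.replicate n (['a', 'o'] : List Char))

theorem P_succ (n : Nat) : P (n + 1) = (P n).map ('a' :: ·) ++ (P n).map ('o' :: ·) := by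
  simp [P, List.replicate_succ, pyProduct, List.flatMap]

theorem length_of_mem_P {n : Nat} {cb : List Char} (h : cb ∈ P n) : cb.length = n := by
  induction n generalizing cb with
  | zero => simp [P, pyProduct] at h; simp [h]
  | succ n ih =>
    rw [P_succ] at h
    rcases List.mem_append.1 h with h' | h' <;>
      · obtain ⟨y, hy, rfl⟩ := List.mem_map.1 h'
        simp [ih hy]

theorem posEq (l : List Char) (s : Int) :
    ((PySem.List.enumerate l s).filter (fun p => aoB p.2)).map (·.1)
      = (aoPosN l).map (fun n : Nat => ((s + (n : Int) : Int))) := by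
  induction l generalizing s with
  | nil => simp [aoPosN]
  | cons c t ih =>
    rw [PySem.List.enumerate_cons, List.filter_cons]
    by_cases h : aoB c = true
    · rw [if_pos (by simpa using h)]
      unfold aoPosN
      rw [if_pos h, List.map_cons, List.map_cons, ih (s + 1), List.map_map]
      congr 1
      · push_cast; ring
      · refine List.map_congr_left fun n _ => ?_
        simp only [Function.comp_apply]; push_cast; ring
    · rw [if_neg (by simpa using h)]
      unfold aoPosN
      rw [if_neg h, ih (s + 1), List.map_map]
      refine List.map_congr_left fun n _ => ?_
      simp only [Function.comp_apply]; push_cast; ring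

theorem shiftFold (L : List (Nat × Char)) (h : Char) (tl : List Char) :
    (L.map (Prod.map (· + 1) id)).foldl (fun nl pc => nl.set pc.1 pc.2) (h :: tl)
      = h :: L.foldl (fun nl pc => nl.set pc.1 pc.2) tl := by
  induction L generalizing tl with
  | nil => simp
  | cons p L ih => simp [Prod.map, List.set, ih]

theorem foldSet_fill (l : List Char) (combo : List Char) (h : combo.length = (aoPosN l).length) :
    ((aoPosN l).zip combo).foldl (fun nl pc => nl.set pc.1 pc.2) l = fill l combo := by
  induction l generalizing combo with
  | nil => simp [aoPosN, fill]
  | cons c t ih =>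
    by_cases hc : aoB c = true
    · simp only [aoPosN, hc, if_pos] at h ⊢
      cases combo with
      | nil => simp at h
      | cons x xs =>
        simp only [List.zip_cons_cons, List.foldl_cons, List.set]
        rw [List.zip_map_left, shiftFold, ih xs (by simpa using h)]
        simp [fill, hc]
    · simp only [aoPosN, hc, if_neg, Bool.not_eq_true] at h ⊢
      rw [List.zip_map_left, shiftFold, ih combo (by simpa using h)]
      simp [fill, hc]

theorem A_eq_map (name : String) :
    generate_ao_variants name
      = (P (aoPosN (PySem.Str.lower name).toList).length).map
          (fun cb => pyTitle (String.mk (fill (PySem.Str.lower name).toList cb))) := by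
  have hpos : ((PySem.List.enumerate (PySem.Str.lower name).toList 0).filter
        (fun p => aoB p.2)).map (·.1)
      = (aoPosN (PySem.Str.lower name).toList).map (fun n : Nat => ((n : Int))) := by
    rw [posEq]; exact List.map_congr_left fun n _ => by ring
  simp only [generate_ao_variants, P, hpos, List.length_map,
    PySem.List.foldl_append_singleton_eq_map, List.nil_append]
  refine List.map_congr_left fun cb hcb => ?_
  have hlen : cb.length = (aoPosN (PySem.Str.lower name).toList).length :=
    length_of_mem_P (n := (aoPosN (PySem.Str.lower name).toList).length) (by simpa [P] using hcb)
  rw [List.zip_map_left, List.foldl_map]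
  simp only [Prod.map, id_eq, PySem.List.pySetD_natCast]
  rw [foldSet_fill _ cb hlen]

theorem B_eq_map (l : List Char) (pre : List Char) :
    altGo l pre = (P (aoPosN l).length).map (fun cb => pyTitle (String.mk (pre ++ fill l cb))) := by
  induction l generalizing pre with
  | nil => simp [altGo, aoPosN, P, pyProduct, fill]
  | cons c t ih =>
    by_cases hc : aoB c = true
    · simp only [altGo, hc, if_pos, aoPosN, List.length_cons, List.length_map, P_succ]
      rw [ih, ih, List.map_append, List.map_map, List.map_map]
      congr 1 <;>
        exact List.map_congr_left fun cb _ => by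
          simp [Function.comp, fill, hc, List.append_assoc]
    · simp only [altGo, hc, if_neg, Bool.not_eq_true, aoPosN, List.length_map]
      rw [ih]
      refine (List.map_congr_left fun cb _ => ?_).symm
      simp [fill, hc, List.append_assoc]

-- ===== VERDICT (by name: the statement is the Claim_ definition above) =====
theorem generate_ao_variants_spec : Claim_equal_generate_ao_variants := by
  intro name _
  unfold Spec_generate_ao_variants generate_ao_variants_alt
  rw [A_eq_map, B_eq_map]
  simp
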